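-- pv_equiv track=rewrite | github.com/eagle-qi/certmonitor | crawler/core/intranet_scanner.py | _is_ip_blacklisted
-- ===== SOURCE A (Python) =====
-- import ipaddress
--
-- DEFAULT_IP_BLACKLIST = [
--     "127.0.0.0/8",       # 回环地址
--     "169.254.0.0/16",    # 链路本地
--     "224.0.0.0/4",      # 组播
--     "255.255.255.255/32", # 广播
-- ]
--
-- def _is_ip_blacklisted(ip_str: str) -> bool:
--     """检查IP是否在黑名单中"""
--     try:
--         ip = ipaddress.ip_address(ip_str)
--         for cidr in DEFAULT_IP_BLACKLIST:
--             if ip in ipaddress.ip_network(cidr, strict=False):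
--                 return True
--     except ValueError:
--         pass
--     return False
-- ===== SOURCE B (Python) =====
-- def _is_ip_blacklisted(ip_str: str) -> bool:
--     """检查IP是否在黑名单中"""
--     parts = ip_str.split('.')
--     if len(parts) != 4:
--         return False
--     octets = []
--     for p in parts:
--         if not (p.isascii() and p.isdigit()) or len(p) > 3 or (len(p) > 1 and p[0] == '0'):
--             return False
--         v = int(p)
--         if v > 255:
--             return False
--         octets.append(v)
--     a, b, c, d = octets
--     return (a == 127 or (a == 169 and b == 254) or 224 <= a <= 239
--             or (a == 255 and b == 255 and c == 255 and d == 255))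
-- ===== Notes on version B (the rewrite author's own statement) =====
-- stated objective: alternative
-- what changed: A parses via the ipaddress library and loops over four CIDR network strings testing containment; B hand-parses the dotted quad (same strict octet rules as ipaddress) and classifies by direct octet predicates (loopback/link-local/multicast/broadcast), with no network objects and no loop over CIDRs.
import Mathlib
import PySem

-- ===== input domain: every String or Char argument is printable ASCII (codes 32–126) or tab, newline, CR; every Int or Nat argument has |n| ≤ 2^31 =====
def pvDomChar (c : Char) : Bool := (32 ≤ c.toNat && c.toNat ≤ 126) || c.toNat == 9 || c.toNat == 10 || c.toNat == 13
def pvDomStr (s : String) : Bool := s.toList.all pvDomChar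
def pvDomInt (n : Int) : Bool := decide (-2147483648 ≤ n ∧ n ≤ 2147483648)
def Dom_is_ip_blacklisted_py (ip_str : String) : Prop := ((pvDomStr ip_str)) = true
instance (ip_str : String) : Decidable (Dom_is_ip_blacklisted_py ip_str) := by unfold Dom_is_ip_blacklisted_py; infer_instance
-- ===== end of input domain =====

-- B replaces A's ipaddress-library loop over the four CIDR strings (parse each network, mask-compare)
-- with a hand parse of the dotted quad and direct octet classification predicates; alternative, not faster.
-- Both programs accept exactly the same IPv4 strings: the shared helper pvParseIPv4? is the
-- step-for-step port of the octet rules both use (A via CPython ipaddress._ipv4_int_from_string /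
-- _parse_octet, B by explicit checks with identical conditions; exact on ASCII input: exactly 4
-- dot-separated parts, each 1–3 ASCII digits, no leading zero unless "0", value ≤ 255).
-- A string that is a valid IPv6 address parses as none here; that is faithful for BOTH programs,
-- since A's 'ip in IPv4Network' is False for every IPv6 address and B's parser rejects it.

-- ===== PORT A =====
-- _parse_octet: nonempty, all ASCII digits, length ≤ 3, no leading zero (unless "0"), value ≤ 255
def pvParseOctet? (cs : List Char) : Option Nat :=
  if cs ≠ [] ∧ cs.all PySem.Chars.isdigit ∧ cs.length ≤ 3 ∧ (cs.length ≤ 1 ∨ cs.headD '0' ≠ '0') then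
    if cs.foldl (fun acc c => acc * 10 + (c.toNat - 48)) 0 ≤ 255 then
      some (cs.foldl (fun acc c => acc * 10 + (c.toNat - 48)) 0)
    else none
  else none

-- ipaddress.ip_address(s) restricted to IPv4 (a valid IPv6 address behaves as none for both programs, see header)
def pvParseIPv4? (s : String) : Option (Nat × Nat × Nat × Nat) :=
  match PySem.Chars.splitOn s.toList ['.'] with
  | [p1, p2, p3, p4] =>
    match pvParseOctet? p1, pvParseOctet? p2, pvParseOctet? p3, pvParseOctet? p4 with
    | some a, some b, some c, some d => some (a, b, c, d)
    | _, _, _, _ => none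
  | _ => none

def pvDEFAULT_IP_BLACKLIST : List String :=
  ["127.0.0.0/8", "169.254.0.0/16", "224.0.0.0/4", "255.255.255.255/32"]

def pvIpToInt (q : Nat × Nat × Nat × Nat) : Nat :=
  q.1 * 16777216 + q.2.1 * 65536 + q.2.2.1 * 256 + q.2.2.2

-- ipaddress.ip_network(cidr, strict=False): network address as an int, and the prefix length
def pvParseCIDR? (cidr : String) : Option (Nat × Nat) :=
  match PySem.Chars.splitOn cidr.toList ['/'] with
  | [addr, plen] =>
    match pvParseIPv4? (String.ofList addr), pvParseOctet? plen with
    | some q, some p => if p ≤ 32 then some (pvIpToInt q, p) else none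
    | _, _ => none
  | _ => none

-- 'ip in ipaddress.ip_network(cidr, strict=False)': compare the masked (network) parts
def pvInNetwork (n : Nat) (cidr : String) : Bool :=
  match pvParseCIDR? cidr with
  | some (net, p) => n >>> (32 - p) == net >>> (32 - p)
  | none => false

def is_ip_blacklisted_py (ip_str : String) : Bool :=
  match pvParseIPv4? ip_str with
  | none => false                       -- ValueError: pass / return False
  | some q => pvDEFAULT_IP_BLACKLIST.any (fun cidr => pvInNetwork (pvIpToInt q) cidr)

-- ===== PORT B =====
-- hand-parse the dotted quad, then classify by octets:
-- loopback, link-local, multicast, broadcast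
def is_ip_blacklisted_py_alt (ip_str : String) : Bool :=
  match pvParseIPv4? ip_str with
  | none => false
  | some (a, b, c, d) =>
    (a == 127) || (a == 169 && b == 254) || (224 ≤ a && a ≤ 239) ||
    (a == 255 && b == 255 && c == 255 && d == 255)

-- ===== PRECONDITION & SPEC =====
def Spec_is_ip_blacklisted_py (ip_str : String) (out : Bool) : Prop := out = is_ip_blacklisted_py_alt ip_str
instance (ip_str : String) (out : Bool) : Decidable (Spec_is_ip_blacklisted_py ip_str out) := by unfold Spec_is_ip_blacklisted_py; infer_instance

-- ===== CLAIM (what is proved, stated in full; the proofs are below) =====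
def Claim_equal_is_ip_blacklisted_py : Prop := ∀ (ip_str : String), Dom_is_ip_blacklisted_py ip_str → Spec_is_ip_blacklisted_py ip_str (is_ip_blacklisted_py ip_str)

-- ===== LEMMAS AND PROOFS =====

theorem pvParseOctet?_le {cs : List Char} {v : Nat} (h : pvParseOctet? cs = some v) : v ≤ 255 := by
  unfold pvParseOctet? at h
  split at h
  · split at h
    · simp_all
    · simp_all
  · simp_all

theorem pvParseIPv4?_le {s : String} {a b c d : Nat}
    (h : pvParseIPv4? s = some (a, b, c, d)) : a ≤ 255 ∧ b ≤ 255 ∧ c ≤ 255 ∧ d ≤ 255 := by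
  unfold pvParseIPv4? at h
  split at h
  · split at h
    · rename_i ha hb hc hd
      simp only [Option.some.injEq, Prod.mk.injEq] at h
      obtain ⟨rfl, rfl, rfl, rfl⟩ := h
      exact ⟨pvParseOctet?_le ha, pvParseOctet?_le hb, pvParseOctet?_le hc, pvParseOctet?_le hd⟩
    · exact absurd h (by simp)
  · exact absurd h (by simp)

theorem pvCIDR_loopback : pvParseCIDR? "127.0.0.0/8" = some (2130706432, 8) := by decide
theorem pvCIDR_linklocal : pvParseCIDR? "169.254.0.0/16" = some (2851995648, 16) := by decide
theorem pvCIDR_multicast : pvParseCIDR? "224.0.0.0/4" = some (3758096384, 4) := by decide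
theorem pvCIDR_broadcast : pvParseCIDR? "255.255.255.255/32" = some (4294967295, 32) := by decide

set_option maxRecDepth 8192 in
theorem pvIn_loopback (n : Nat) : pvInNetwork n "127.0.0.0/8" = (n >>> 24 == 127) := by
  simp only [pvInNetwork, pvCIDR_loopback]; norm_num [Nat.shiftRight_eq_div_pow]

set_option maxRecDepth 8192 in
theorem pvIn_linklocal (n : Nat) : pvInNetwork n "169.254.0.0/16" = (n >>> 16 == 43518) := by
  simp only [pvInNetwork, pvCIDR_linklocal]; norm_num [Nat.shiftRight_eq_div_pow]

set_option maxRecDepth 8192 in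
theorem pvIn_multicast (n : Nat) : pvInNetwork n "224.0.0.0/4" = (n >>> 28 == 14) := by
  simp only [pvInNetwork, pvCIDR_multicast]; norm_num [Nat.shiftRight_eq_div_pow]

set_option maxRecDepth 8192 in
theorem pvIn_broadcast (n : Nat) : pvInNetwork n "255.255.255.255/32" = (n >>> 0 == 4294967295) := by
  simp only [pvInNetwork, pvCIDR_broadcast]; norm_num [Nat.shiftRight_eq_div_pow]

set_option maxRecDepth 8192 in
theorem pv_core (a b c d : Nat) (ha : a ≤ 255) (hb : b ≤ 255) (hc : c ≤ 255) (hd : d ≤ 255) :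
    pvDEFAULT_IP_BLACKLIST.any (fun cidr => pvInNetwork (pvIpToInt (a, b, c, d)) cidr) =
    ((a == 127) || (a == 169 && b == 254) || (224 ≤ a && a ≤ 239) ||
      (a == 255 && b == 255 && c == 255 && d == 255)) := by
  simp only [pvDEFAULT_IP_BLACKLIST, List.any_cons, List.any_nil,
    pvIn_loopback, pvIn_linklocal, pvIn_multicast, pvIn_broadcast, pvIpToInt]
  rw [Bool.eq_iff_iff]
  simp only [Bool.or_eq_true, Bool.and_eq_true, beq_iff_eq, decide_eq_true_eq,
    Nat.shiftRight_eq_div_pow]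
  norm_num
  omega

-- ===== VERDICT (by name: the statement is the Claim_ definition above) =====
theorem is_ip_blacklisted_py_spec : Claim_equal_is_ip_blacklisted_py := by
  intro s _
  unfold Spec_is_ip_blacklisted_py is_ip_blacklisted_py is_ip_blacklisted_py_alt
  cases hp : pvParseIPv4? s with
  | none => rfl
  | some q =>
    obtain ⟨a, b, c, d⟩ := q
    obtain ⟨ha, hb, hc, hd⟩ := pvParseIPv4?_le hp
    exact pv_core a b c d ha hb hc hd
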